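-- pv_equiv track=rewrite | github.com/AustereTriceratops/rocking-cube | analysis.py | generate_all_moves_of_len
-- ===== SOURCE A (Python) =====
-- def generate_all_moves_of_len(depth, oriented=False):
--     N = 2**(depth + 1)
--     generated_moves = set()
--
--     if depth == 0: return generated_moves
--
--     for i in range(N):
--         ib = format(i, f'0{depth + 1}b') # convert to binary with leading 0s
--         moves = []
--         prevMoveType = ""
--         l_parity = 0
--         r_parity = 0
--
--         if ib[0] == "0":
--             prevMoveType = "R"
--         elif ib[0] == "1":
--             prevMoveType = "L"
--
--         for j in range(depth):
--             if ib[j + 1] == "0":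
--                 if prevMoveType == "L":
--                     moves.append("R")
--                     prevMoveType = "R"
--                     r_parity += 1
--                 elif prevMoveType == "R":
--                     moves.append("L")
--                     prevMoveType = "L"
--                     l_parity += 1
--             elif ib[j + 1] == "1":
--                 if prevMoveType == "L":
--                     moves.append("R'")
--                     prevMoveType = "R"
--                     r_parity -= 1
--                 elif prevMoveType == "R":
--                     moves.append("L'")
--                     prevMoveType = "L"
--                     l_parity -= 1
--
--         if not oriented or (oriented and l_parity % 3 == 0 and r_parity % 3 == 0):
--             generated_moves.add("".join(moves))
--
--     return generated_moves
-- ===== SOURCE B (Python) =====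
-- def generate_all_moves_of_len(depth, oriented=False):
--     # Recursive generation: move types strictly alternate, so each sequence is
--     # (starting type, prime pattern); generate all of them by recursion on depth.
--     if depth == 0:
--         return set()
--
--     def gen(d, t):
--         # yields all alternating move sequences of length d starting with type t,
--         # as (string, l_parity, r_parity)
--         if d == 0:
--             yield ("", 0, 0)
--             return
--         other = "L" if t == "R" else "R"
--         for prime in (False, True):
--             token = t + "'" if prime else t
--             delta = -1 if prime else 1
--             for s, l, r in gen(d - 1, other):
--                 if t == "L":
--                     yield (token + s, l + delta, r)
--                 else:
--                     yield (token + s, l, r + delta)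
--
--     result = set()
--     for start in ("L", "R"):
--         for s, l, r in gen(depth, start):
--             if not oriented or (l % 3 == 0 and r % 3 == 0):
--                 result.add(s)
--     return result
-- ===== Notes on version B (the rewrite author's own statement) =====
-- stated objective: alternative
-- what changed: B replaces A's enumerate-integers-and-decode-binary state machine (format(i,'b') plus an inner loop branching on prevMoveType) by direct recursive generation: gen(d, t) recursively builds all alternating move sequences of length d starting with type t together with their parities, and the result set is filled from gen(depth,'L') and gen(depth,'R').
-- outside the precondition, e.g. on generate_all_moves_of_len(-1, False): A returns {''}, B raises RecursionError
import Mathlib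
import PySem

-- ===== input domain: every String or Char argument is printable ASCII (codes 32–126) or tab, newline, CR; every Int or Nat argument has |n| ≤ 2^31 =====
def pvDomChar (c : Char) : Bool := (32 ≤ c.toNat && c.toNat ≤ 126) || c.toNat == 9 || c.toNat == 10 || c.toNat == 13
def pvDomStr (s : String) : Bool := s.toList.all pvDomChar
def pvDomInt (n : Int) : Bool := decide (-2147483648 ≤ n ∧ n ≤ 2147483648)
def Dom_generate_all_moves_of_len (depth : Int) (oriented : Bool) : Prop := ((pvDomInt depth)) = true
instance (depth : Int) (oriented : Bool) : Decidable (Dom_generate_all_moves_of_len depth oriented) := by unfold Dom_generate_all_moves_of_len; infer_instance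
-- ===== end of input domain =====

-- B replaces A's enumerate-integers-and-decode-binary state machine by direct recursive
-- generation of the alternating move sequences (same cost; objective: alternative algorithm).

-- ===== PORT A =====

-- hand port of format(i, f'0{k}b') (binary, zero-padded to width k), exact for i < 2^k:
-- it yields exactly the k binary digits of i, most significant first.
def fmtBin : Nat → Nat → List Char
  | 0, _ => []
  | k + 1, i => (if i / 2 ^ k % 2 == 1 then '1' else '0') :: fmtBin k i

-- the body of A's inner `for j in range(depth)` loop, acting on (moves, prevMoveType, l_parity, r_parity)
def stepA (st : List String × String × Int × Int) (c : Char) : List String × String × Int × Int :=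
  let moves := st.1
  let prev := st.2.1
  let l := st.2.2.1
  let r := st.2.2.2
  if c == '0' then
    if prev == "L" then (moves ++ ["R"], "R", l, r + 1)
    else if prev == "R" then (moves ++ ["L"], "L", l + 1, r)
    else st
  else if c == '1' then
    if prev == "L" then (moves ++ ["R'"], "R", l, r - 1)
    else if prev == "R" then (moves ++ ["L'"], "L", l - 1, r)
    else st
  else st

def generate_all_moves_of_len (depth : Int) (oriented : Bool) : List String :=
  if depth = 0 then [] else
  let d := depth.toNat
  (List.range (2 ^ (d + 1))).foldl (fun generated_moves i =>
    let ib := fmtBin (d + 1) i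
    let prevMoveType : String := ""
    let prevMoveType := if ib.getD 0 ' ' == '0' then "R"
                        else if ib.getD 0 ' ' == '1' then "L" else prevMoveType
    let st := (List.range d).foldl (fun st j => stepA st (ib.getD (j + 1) ' '))
                ([], prevMoveType, 0, 0)
    if !oriented || (oriented && PySem.Int.mod st.2.2.1 3 == 0 && PySem.Int.mod st.2.2.2 3 == 0)
    then PySem.Set.add generated_moves (PySem.Str.join "" st.1)
    else generated_moves) []

-- ===== PORT B =====

-- gen(d, t): all alternating move sequences of length d starting with type t, with
-- parities; in Source B gen is a recursive generator, ported as the list of its yields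
def genAlt : Nat → String → List (String × Int × Int)
  | 0, _ => [("", 0, 0)]
  | d + 1, t =>
    let other := if t == "R" then "L" else "R"
    [false, true].foldl (fun out prime =>
      let token := if prime then t ++ "'" else t
      let delta : Int := if prime then -1 else 1
      out ++ (genAlt d other).map (fun e =>
        if t == "L" then (token ++ e.1, e.2.1 + delta, e.2.2)
        else (token ++ e.1, e.2.1, e.2.2 + delta))) []

def generate_all_moves_of_len_alt (depth : Int) (oriented : Bool) : List String :=
  if depth = 0 then [] else
  ["L", "R"].foldl (fun result start =>
    (genAlt depth.toNat start).foldl (fun result e =>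
      if !oriented || (PySem.Int.mod e.2.1 3 == 0 && PySem.Int.mod e.2.2 3 == 0)
      then PySem.Set.add result e.1 else result) result) []

-- ===== PRECONDITION & SPEC =====
-- Pre_ restricts to nonnegative depth, the natural domain of a sequence length: A raises
-- TypeError for depth ≤ -2 (2**negative is a float handed to range), and at depth = -1 B's
-- recursion does not terminate (RecursionError) while A happens to return {''}.
def Pre_generate_all_moves_of_len (depth : Int) (oriented : Bool) : Prop := 0 ≤ depth
instance (depth : Int) (oriented : Bool) : Decidable (Pre_generate_all_moves_of_len depth oriented) := by unfold Pre_generate_all_moves_of_len; infer_instance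
def pvWitness_generate_all_moves_of_len : Int × Bool := (2, true)

def Spec_generate_all_moves_of_len (depth : Int) (oriented : Bool) (out : List String) : Prop := out = generate_all_moves_of_len_alt depth oriented
instance (depth : Int) (oriented : Bool) (out : List String) : Decidable (Spec_generate_all_moves_of_len depth oriented out) := by unfold Spec_generate_all_moves_of_len; infer_instance

-- ===== CLAIM (what is proved, stated in full; the proofs are below) =====
def Claim_equal_generate_all_moves_of_len : Prop := ∀ (depth : Int) (oriented : Bool), Dom_generate_all_moves_of_len depth oriented → Pre_generate_all_moves_of_len depth oriented → Spec_generate_all_moves_of_len depth oriented (generate_all_moves_of_len depth oriented)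

-- ===== LEMMAS AND PROOFS =====

-- all bit strings of length k over {'0','1'}, in binary counting order (MSB first)
def bitLists : Nat → List (List Char)
  | 0 => [[]]
  | k + 1 => (bitLists k).map ('0' :: ·) ++ (bitLists k).map ('1' :: ·)

def finishA (st : List String × String × Int × Int) : String × Int × Int :=
  (PySem.Str.join "" st.1, st.2.2.1, st.2.2.2)

def addIf (o : Bool) (acc : List String) (e : String × Int × Int) : List String :=
  if !o || (PySem.Int.mod e.2.1 3 == 0 && PySem.Int.mod e.2.2 3 == 0)
  then PySem.Set.add acc e.1 else acc

lemma flatten_intersperse_nil (m : List (List Char)) :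
    (List.intersperse ([] : List Char) m).flatten = m.flatten := by
  induction m with
  | nil => simp
  | cons a t ih =>
    cases t with
    | nil => simp
    | cons b t2 => simp_all [List.intersperse]

lemma chars_join_nil (l : List (List Char)) :
    PySem.Chars.join [] l = l.flatten := by
  simp [PySem.Chars.join, List.intercalate, flatten_intersperse_nil]

lemma join0_append_singleton (m : List String) (t s : String) :
    PySem.Str.join "" (m ++ [t]) ++ s = PySem.Str.join "" m ++ (t ++ s) := by
  apply String.toList_inj.mp
  simp [chars_join_nil]

lemma join0_nil_append (s : String) : PySem.Str.join "" [] ++ s = s := by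
  apply String.toList_inj.mp
  simp

lemma fmtBin_add_pow (k : Nat) : ∀ j i, k ≤ j → fmtBin k (2 ^ j + i) = fmtBin k i := by
  induction k with
  | zero => intro j i _; rfl
  | succ k ih =>
    intro j i h
    have hj : 2 ^ j = 2 ^ (j - k) * 2 ^ k := by
      rw [← pow_add]; congr 1; omega
    have hd : (2 ^ j + i) / 2 ^ k = 2 ^ (j - k) + i / 2 ^ k := by
      rw [hj, Nat.add_comm, Nat.add_mul_div_right _ _ (Nat.two_pow_pos k), Nat.add_comm]
    have hm : (2 ^ (j - k) + i / 2 ^ k) % 2 = i / 2 ^ k % 2 := by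
      have : 2 ^ (j - k) = 2 * 2 ^ (j - k - 1) := by
        rw [← pow_succ']; congr 1; omega
      rw [this, Nat.mul_add_mod]
    simp only [fmtBin, hd, hm]
    rw [ih j i (by omega)]

lemma fmtBin_lo (k i : Nat) (h : i < 2 ^ k) : fmtBin (k + 1) i = '0' :: fmtBin k i := by
  simp [fmtBin, Nat.div_eq_of_lt h]

lemma fmtBin_hi (k i : Nat) (h : i < 2 ^ k) :
    fmtBin (k + 1) (2 ^ k + i) = '1' :: fmtBin k i := by
  have hd : (2 ^ k + i) / 2 ^ k = 1 := by
    rw [Nat.add_comm, Nat.add_div_right _ (Nat.two_pow_pos k),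
      Nat.div_eq_of_lt h]
  simp [fmtBin, hd, fmtBin_add_pow k k i (le_refl k)]

lemma map_fmtBin_range (k : Nat) :
    (List.range (2 ^ k)).map (fmtBin k) = bitLists k := by
  induction k with
  | zero => simp [fmtBin, bitLists]
  | succ k ih =>
    have hsplit : 2 ^ (k + 1) = 2 ^ k + 2 ^ k := by rw [pow_succ]; omega
    rw [hsplit, List.range_add, List.map_append, List.map_map]
    have h1 : (List.range (2 ^ k)).map (fmtBin (k + 1))
        = (bitLists k).map ('0' :: ·) := by
      rw [← ih, List.map_map]
      apply List.map_congr_left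
      intro i hi
      exact fmtBin_lo k i (List.mem_range.mp hi)
    have h2 : (List.range (2 ^ k)).map (fmtBin (k + 1) ∘ (2 ^ k + ·))
        = (bitLists k).map ('1' :: ·) := by
      rw [← ih, List.map_map]
      apply List.map_congr_left
      intro i hi
      exact fmtBin_hi k i (List.mem_range.mp hi)
    rw [h1, h2]; rfl

lemma bitLists_length (k : Nat) : ∀ cs ∈ bitLists k, cs.length = k := by
  induction k with
  | zero => intro cs h; simp [bitLists] at h; simp [h]
  | succ k ih =>
    intro cs h
    simp only [bitLists, List.mem_append, List.mem_map] at h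
    rcases h with ⟨a, ha, rfl⟩ | ⟨a, ha, rfl⟩ <;> simp [ih a ha]

lemma map_getD_range (xs : List Char) :
    (List.range xs.length).map (fun j => xs.getD j ' ') = xs := by
  induction xs with
  | nil => simp
  | cons a t ih =>
    rw [List.length_cons, List.range_succ_eq_map, List.map_cons, List.map_map]
    simp only [List.getD_cons_zero, Function.comp_def, List.getD_cons_succ]
    rw [ih]

lemma foldl_idx_eq_foldl_chars (cs : List Char) (c0 : Char)
    (st : List String × String × Int × Int) :
    (List.range cs.length).foldl (fun st j => stepA st ((c0 :: cs).getD (j + 1) ' ')) st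
      = cs.foldl stepA st := by
  have hm : (List.range cs.length).map (fun j => (c0 :: cs).getD (j + 1) ' ') = cs := by
    simp only [List.getD_cons_succ]
    exact map_getD_range cs
  conv_rhs => rw [← hm, List.foldl_map]

-- stepA on explicit states (pure computation)
lemma stepA_R0 (moves : List String) (l r : Int) :
    stepA (moves, "R", l, r) '0' = (moves ++ ["L"], "L", l + 1, r) := rfl
lemma stepA_R1 (moves : List String) (l r : Int) :
    stepA (moves, "R", l, r) '1' = (moves ++ ["L'"], "L", l - 1, r) := rfl
lemma stepA_L0 (moves : List String) (l r : Int) :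
    stepA (moves, "L", l, r) '0' = (moves ++ ["R"], "R", l, r + 1) := rfl
lemma stepA_L1 (moves : List String) (l r : Int) :
    stepA (moves, "L", l, r) '1' = (moves ++ ["R'"], "R", l, r - 1) := rfl

lemma genAlt_succ_L (k : Nat) :
    genAlt (k + 1) "L"
      = (genAlt k "R").map (fun e => ("L" ++ e.1, e.2.1 + 1, e.2.2))
        ++ (genAlt k "R").map (fun e => ("L" ++ "'" ++ e.1, e.2.1 + -1, e.2.2)) := rfl

lemma genAlt_succ_R (k : Nat) :
    genAlt (k + 1) "R"
      = (genAlt k "L").map (fun e => ("R" ++ e.1, e.2.1, e.2.2 + 1))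
        ++ (genAlt k "L").map (fun e => ("R" ++ "'" ++ e.1, e.2.1, e.2.2 + -1)) := rfl

-- the inner state machine of A, run over a bit string, is B's recursive generator
lemma fold_bits (k : Nat) : ∀ (moves : List String) (l r : Int),
    ((bitLists k).map (fun cs => finishA (cs.foldl stepA (moves, "R", l, r)))
      = (genAlt k "L").map (fun e => (PySem.Str.join "" moves ++ e.1, l + e.2.1, r + e.2.2)))
    ∧ ((bitLists k).map (fun cs => finishA (cs.foldl stepA (moves, "L", l, r)))
      = (genAlt k "R").map (fun e => (PySem.Str.join "" moves ++ e.1, l + e.2.1, r + e.2.2))) := by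
  induction k with
  | zero =>
    intro moves l r
    constructor <;> simp [bitLists, genAlt, finishA]
  | succ k ih =>
    intro moves l r
    constructor
    · rw [show bitLists (k + 1)
          = (bitLists k).map ('0' :: ·) ++ (bitLists k).map ('1' :: ·) from rfl]
      rw [List.map_append, List.map_map, List.map_map]
      simp only [Function.comp_def, List.foldl_cons, stepA_R0, stepA_R1]
      rw [(ih (moves ++ ["L"]) (l + 1) r).2, (ih (moves ++ ["L'"]) (l - 1) r).2]
      rw [genAlt_succ_L, List.map_append, List.map_map, List.map_map]
      congr 1
      · apply List.map_congr_left
        intro e _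
        obtain ⟨s, a, b⟩ := e
        simp only [Function.comp_def, join0_append_singleton, Prod.mk.injEq]
        refine ⟨?_, ?_, ?_⟩ <;> first | rfl | ring | trivial
      · apply List.map_congr_left
        intro e _
        obtain ⟨s, a, b⟩ := e
        simp only [Function.comp_def, join0_append_singleton, Prod.mk.injEq]
        refine ⟨?_, ?_, ?_⟩ <;>
          first
          | (rw [show ("L'" : String) = "L" ++ "'" from by decide, String.append_assoc])
          | ring | trivial
    · rw [show bitLists (k + 1)
          = (bitLists k).map ('0' :: ·) ++ (bitLists k).map ('1' :: ·) from rfl]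
      rw [List.map_append, List.map_map, List.map_map]
      simp only [Function.comp_def, List.foldl_cons, stepA_L0, stepA_L1]
      rw [(ih (moves ++ ["R"]) l (r + 1)).1, (ih (moves ++ ["R'"]) l (r - 1)).1]
      rw [genAlt_succ_R, List.map_append, List.map_map, List.map_map]
      congr 1
      · apply List.map_congr_left
        intro e _
        obtain ⟨s, a, b⟩ := e
        simp only [Function.comp_def, join0_append_singleton, Prod.mk.injEq]
        refine ⟨?_, ?_, ?_⟩ <;> first | rfl | ring | trivial
      · apply List.map_congr_left
        intro e _
        obtain ⟨s, a, b⟩ := e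
        simp only [Function.comp_def, join0_append_singleton, Prod.mk.injEq]
        refine ⟨?_, ?_, ?_⟩ <;>
          first
          | (rw [show ("R'" : String) = "R" ++ "'" from by decide, String.append_assoc])
          | ring | trivial

lemma map_init_id (xs : List (String × Int × Int)) :
    xs.map (fun e => (PySem.Str.join "" [] ++ e.1, 0 + e.2.1, 0 + e.2.2)) = xs := by
  have h : (fun e : String × Int × Int =>
      (PySem.Str.join "" [] ++ e.1, 0 + e.2.1, 0 + e.2.2)) = id := by
    funext e
    obtain ⟨s, a, b⟩ := e
    simp [join0_nil_append]
  rw [h, List.map_id]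

def bodyG (d : Nat) (o : Bool) (acc : List String) (ib : List Char) : List String :=
  let prevMoveType : String := ""
  let prevMoveType := if ib.getD 0 ' ' == '0' then "R"
                      else if ib.getD 0 ' ' == '1' then "L" else prevMoveType
  let st := (List.range d).foldl (fun st j => stepA st (ib.getD (j + 1) ' '))
              ([], prevMoveType, 0, 0)
  if !o || (o && PySem.Int.mod st.2.2.1 3 == 0 && PySem.Int.mod st.2.2.2 3 == 0)
  then PySem.Set.add acc (PySem.Str.join "" st.1)
  else acc

lemma bodyG_cons (d : Nat) (o : Bool) (acc : List String) (c : Char) (cs : List Char)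
    (hc : c = '0' ∨ c = '1') (hl : cs.length = d) :
    bodyG d o acc (c :: cs)
      = addIf o acc (finishA (cs.foldl stepA
          ([], if c = '0' then "R" else "L", 0, 0))) := by
  subst hl
  rcases hc with rfl | rfl <;>
  · simp only [bodyG, List.getD_cons_zero, foldl_idx_eq_foldl_chars]
    cases o <;> simp [addIf, finishA]

lemma half_fold (d : Nat) (o : Bool) (c : Char) (t : String) (init : List String)
    (hc : c = '0' ∨ c = '1')
    (hmain : (bitLists d).map (fun cs => finishA (cs.foldl stepA
        ([], if c = '0' then "R" else "L", 0, 0))) = genAlt d t) :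
    ((bitLists d).map (c :: ·)).foldl (bodyG d o) init
      = (genAlt d t).foldl (addIf o) init := by
  rw [List.foldl_map]
  refine (PySem.List.foldl_congr_mem (bitLists d) _
    (fun acc cs => addIf o acc (finishA (cs.foldl stepA
      ([], if c = '0' then "R" else "L", 0, 0)))) init
    (fun acc cs hcs => bodyG_cons d o acc c cs hc (bitLists_length d cs hcs))).trans ?_
  rw [← List.foldl_map, hmain]

theorem generate_all_moves_of_len_spec : Claim_equal_generate_all_moves_of_len := by
  intro depth oriented _hdom _hpre
  unfold Spec_generate_all_moves_of_len
  by_cases h0 : depth = 0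
  · simp [generate_all_moves_of_len, generate_all_moves_of_len_alt, h0]
  · have hA : generate_all_moves_of_len depth oriented
        = ((List.range (2 ^ (depth.toNat + 1))).map (fmtBin (depth.toNat + 1))).foldl
            (bodyG depth.toNat oriented) [] := by
      rw [List.foldl_map]
      simp only [generate_all_moves_of_len, if_neg h0]
      rfl
    have hB : generate_all_moves_of_len_alt depth oriented
        = List.foldl (addIf oriented)
            (List.foldl (addIf oriented) [] (genAlt depth.toNat "L"))
            (genAlt depth.toNat "R") := by
      simp only [generate_all_moves_of_len_alt, if_neg h0, List.foldl_cons, List.foldl_nil]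
      rfl
    rw [hA, hB, map_fmtBin_range]
    rw [show bitLists (depth.toNat + 1)
        = (bitLists depth.toNat).map ('0' :: ·) ++ (bitLists depth.toNat).map ('1' :: ·)
        from rfl]
    rw [List.foldl_append]
    rw [half_fold depth.toNat oriented '0' "L" [] (Or.inl rfl) ?hL,
        half_fold depth.toNat oriented '1' "R" _ (Or.inr rfl) ?hR]
    case hL =>
      have h := (fold_bits depth.toNat [] 0 0).1
      rw [map_init_id] at h
      simpa using h
    case hR =>
      have h := (fold_bits depth.toNat [] 0 0).2
      rw [map_init_id] at h
      simpa using h
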